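-- pv_equiv track=rewrite | github.com/Rhodawk-AI/Rhodawk-devops-engine | app.py | _normalize_repo
-- ===== SOURCE A (Python) =====
-- def _normalize_repo(raw: str) -> str:
--     """Return 'owner/repo' from any common GitHub URL format, or '' if invalid."""
--     s = raw.strip().rstrip("/").removesuffix(".git")
--     # Strip common prefixes
--     for prefix in ("https://github.com/", "http://github.com/", "github.com/"):
--         if s.startswith(prefix):
--             s = s[len(prefix):]
--             break
--     parts = [p for p in s.split("/") if p]
--     if len(parts) == 2:
--         return f"{parts[0]}/{parts[1]}"
--     return ""
-- ===== SOURCE B (Python) =====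
-- def _normalize_repo(raw: str) -> str:
--     """Return 'owner/repo' from any common GitHub URL format, or '' if invalid."""
--     s = raw.strip().rstrip("/")
--     if s.endswith(".git"):
--         s = s[:-4]
--     if s.startswith("https://github.com/"):
--         s = s[len("https://github.com/"):]
--     elif s.startswith("http://github.com/"):
--         s = s[len("http://github.com/"):]
--     elif s.startswith("github.com/"):
--         s = s[len("github.com/"):]
--     # one left-to-right pass: collect exactly two slash-separated segments
--     owner = []
--     repo = []
--     state = 0  # 0 before owner, 1 in owner, 2 between, 3 in repo, 4 after repo
--     for ch in s:
--         if ch == "/":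
--             if state == 1:
--                 state = 2
--             elif state == 3:
--                 state = 4
--         else:
--             if state <= 1:
--                 owner.append(ch)
--                 state = 1
--             elif state <= 3:
--                 repo.append(ch)
--                 state = 3
--             else:
--                 return ""  # a third segment starts: invalid
--     if repo:
--         return "".join(owner) + "/" + "".join(repo)
--     return ""
-- ===== Notes on version B (the rewrite author's own statement) =====
-- stated objective: alternative
-- what changed: B replaces A's split-then-truthiness-filter-then-count-check tokenization with a single left-to-right state-machine pass that collects exactly two slash-separated segments and bails out as soon as a third one starts.
import Mathlib
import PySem

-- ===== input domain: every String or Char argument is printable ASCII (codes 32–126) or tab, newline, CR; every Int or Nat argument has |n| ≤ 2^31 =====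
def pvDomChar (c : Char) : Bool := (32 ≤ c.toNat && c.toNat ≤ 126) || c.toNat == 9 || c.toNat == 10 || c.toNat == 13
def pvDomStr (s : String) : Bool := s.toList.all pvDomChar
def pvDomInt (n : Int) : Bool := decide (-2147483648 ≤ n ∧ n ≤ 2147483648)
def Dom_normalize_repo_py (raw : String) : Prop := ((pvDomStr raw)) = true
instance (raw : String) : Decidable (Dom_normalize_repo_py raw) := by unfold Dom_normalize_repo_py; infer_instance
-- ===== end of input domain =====

-- B replaces A's split-then-filter-then-count tokenization by a single left-to-right
-- state-machine pass that collects exactly two slash-separated segments (objective: alternative).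

-- ===== PORT A =====
-- s.rstrip("/") ported by hand (PySem has no rstrip-with-chars): exact for ASCII '/'
def pvRstripSlash (s : List Char) : List Char := (s.reverse.dropWhile (fun c => c == '/')).reverse

-- s.removesuffix(".git") ported by hand: exact (drop the suffix once iff present)
def pvRemoveSuffixGit (s : List Char) : List Char :=
  if PySem.Chars.endswith s ".git".toList then s.take (s.length - 4) else s

def pvPrefixes : List (List Char) :=
  ["https://github.com/".toList, "http://github.com/".toList, "github.com/".toList]

-- A's 'for prefix in (…): if s.startswith(prefix): s = s[len(prefix):]; break'
def pvStripPrefLoop : List (List Char) → List Char → List Char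
  | [], s => s
  | p :: rest, s =>
    if PySem.Chars.startswith s p then s.drop p.length else pvStripPrefLoop rest s

def normalize_repo_py (raw : String) : String :=
  let s0 := pvRemoveSuffixGit (pvRstripSlash (PySem.Chars.strip raw.toList))
  let s := pvStripPrefLoop pvPrefixes s0
  let parts := (PySem.Chars.splitOn s ['/']).filter (fun p => !p.isEmpty)
  if parts.length = 2 then String.ofList (parts[0]! ++ '/' :: parts[1]!) else ""

-- ===== PORT B =====
-- one pass; states: 0 before owner, 1 in owner, 2 between, 3 in repo, 4 after repo;
-- none = B's early 'return ""' when a third segment starts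
def pvAltScan : List Char → List Char → List Char → Nat → Option (List Char × List Char)
  | [], owner, repo, _ => some (owner, repo)
  | c :: rest, owner, repo, st =>
    if c == '/' then
      pvAltScan rest owner repo (if st == 1 then 2 else if st == 3 then 4 else st)
    else if st ≤ 1 then pvAltScan rest (owner ++ [c]) repo 1
    else if st ≤ 3 then pvAltScan rest owner (repo ++ [c]) 3
    else none

def normalize_repo_py_alt (raw : String) : String :=
  let s1 := pvRstripSlash (PySem.Chars.strip raw.toList)
  let s2 := if PySem.Chars.endswith s1 ".git".toList
            then PySem.Chars.slice s1 none (some (-4)) else s1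
  let s3 := if PySem.Chars.startswith s2 "https://github.com/".toList then s2.drop "https://github.com/".length
            else if PySem.Chars.startswith s2 "http://github.com/".toList then s2.drop "http://github.com/".length
            else if PySem.Chars.startswith s2 "github.com/".toList then s2.drop "github.com/".length
            else s2
  match pvAltScan s3 [] [] 0 with
  | some (owner, repo) => if repo.isEmpty then "" else String.ofList (owner ++ '/' :: repo)
  | none => ""

-- ===== PRECONDITION & SPEC =====
def Spec_normalize_repo_py (raw : String) (out : String) : Prop := out = normalize_repo_py_alt raw
instance (raw : String) (out : String) : Decidable (Spec_normalize_repo_py raw out) := by unfold Spec_normalize_repo_py; infer_instance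

-- ===== CLAIM (what is proved, stated in full; the proofs are below) =====
def Claim_equal_normalize_repo_py : Prop := ∀ (raw : String), Dom_normalize_repo_py raw → Spec_normalize_repo_py raw (normalize_repo_py raw)

-- ===== LEMMAS AND PROOFS =====

-- split("/") with an accumulator for the current (reversed) piece
def pvSplitSlash : List Char → List Char → List (List Char)
  | [], cur => [cur.reverse]
  | c :: r, cur => if c == '/' then cur.reverse :: pvSplitSlash r [] else pvSplitSlash r (c :: cur)

-- the nonempty slash-separated segments, with the current (reversed) piece
def pvSegAcc : List Char → List Char → List (List Char)
  | [], cur => if cur.isEmpty then [] else [cur.reverse]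
  | c :: r, cur =>
    if c == '/' then (if cur.isEmpty then pvSegAcc r [] else cur.reverse :: pvSegAcc r [])
    else pvSegAcc r (c :: cur)

def pvOut : List (List Char) → List Char
  | [o, r] => o ++ '/' :: r
  | _ => []

lemma pvGo_zero (cur : List Char) (acc : List (List Char)) :
    PySem.Chars.splitOn.go ['/'] 0 [] cur acc = ((cur.reverse ++ []) :: acc).reverse := rfl

lemma pvGo_nil (n : Nat) (cur : List Char) (acc : List (List Char)) :
    PySem.Chars.splitOn.go ['/'] (n+1) [] cur acc = (cur.reverse :: acc).reverse := rfl

lemma pvGo_cons (n : Nat) (c : Char) (rest cur : List Char) (acc : List (List Char)) :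
    PySem.Chars.splitOn.go ['/'] (n+1) (c::rest) cur acc =
    (if ['/'].isPrefixOf (c::rest) then
       PySem.Chars.splitOn.go ['/'] n (List.drop 1 (c::rest)) [] (cur.reverse::acc)
     else PySem.Chars.splitOn.go ['/'] n rest (c::cur) acc) := rfl

lemma pvGo_eq (fuel : Nat) : ∀ (l cur : List Char) (acc : List (List Char)), l.length ≤ fuel →
    PySem.Chars.splitOn.go ['/'] fuel l cur acc = acc.reverse ++ pvSplitSlash l cur := by
  induction fuel with
  | zero =>
    intro l cur acc h
    have : l = [] := List.eq_nil_of_length_eq_zero (Nat.le_zero.mp h)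
    subst this
    rw [pvGo_zero]
    simp [pvSplitSlash]
  | succ n ih =>
    intro l cur acc h
    cases l with
    | nil =>
      rw [pvGo_nil]
      simp [pvSplitSlash]
    | cons c rest =>
      rw [pvGo_cons]
      by_cases hc : c = '/'
      · subst hc
        simp only [List.length_cons] at h
        rw [if_pos (by simp [List.isPrefixOf])]
        rw [ih _ [] _ (by simp; omega)]
        simp [pvSplitSlash]
      · rw [if_neg (by simp [List.isPrefixOf]; exact fun h => hc h.symm)]
        rw [ih rest (c :: cur) acc (by simpa using Nat.le_of_succ_le_succ h)]
        simp [pvSplitSlash, hc]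

lemma pvSplitOn_eq (s : List Char) : PySem.Chars.splitOn s ['/'] = pvSplitSlash s [] := by
  rw [PySem.Chars.splitOn]
  rw [pvGo_eq (s.length + 1) s [] [] (by omega)]
  simp

lemma pvFilter_split (s : List Char) : ∀ cur,
    (pvSplitSlash s cur).filter (fun p => !p.isEmpty) = pvSegAcc s cur := by
  induction s with
  | nil =>
    intro cur
    cases cur <;> simp [pvSplitSlash, pvSegAcc]
  | cons c r ih =>
    intro cur
    by_cases hc : c = '/'
    · subst hc
      cases cur <;> simp [pvSplitSlash, pvSegAcc, ih]
    · simp [pvSplitSlash, pvSegAcc, hc, ih]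

lemma pvSegAcc_ne_nil (s : List Char) : ∀ cur, cur ≠ [] → pvSegAcc s cur ≠ [] := by
  induction s with
  | nil => intro cur h; simp [pvSegAcc, h]
  | cons c r ih =>
    intro cur h
    by_cases hc : c = '/'
    · subst hc; simp [pvSegAcc, h]
    · have he : pvSegAcc (c :: r) cur = pvSegAcc r (c :: cur) := by simp [pvSegAcc, hc]
      rw [he]
      exact ih _ (by simp)

def pvFin : Option (List Char × List Char) → List Char
  | some (o, r) => if r.isEmpty then [] else o ++ '/' :: r
  | none => []

lemma pvOut_nil : pvOut [] = [] := rfl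
lemma pvOut_one (a : List Char) : pvOut [a] = [] := rfl
lemma pvOut_two (a b : List Char) : pvOut [a, b] = a ++ '/' :: b := rfl
lemma pvOut_long (a b c : List Char) (l : List (List Char)) : pvOut (a :: b :: c :: l) = [] := rfl

lemma pvKey (s : List Char) : ∀ (owner repo : List Char) (st : Nat)
    (pre : List (List Char)) (cur : List Char),
    ((st = 0 ∧ owner = [] ∧ repo = [] ∧ pre = [] ∧ cur = []) ∨
     (st = 1 ∧ owner ≠ [] ∧ repo = [] ∧ pre = [] ∧ cur = owner.reverse) ∨
     (st = 2 ∧ owner ≠ [] ∧ repo = [] ∧ pre = [owner] ∧ cur = []) ∨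
     (st = 3 ∧ owner ≠ [] ∧ repo ≠ [] ∧ pre = [owner] ∧ cur = repo.reverse) ∨
     (st = 4 ∧ owner ≠ [] ∧ repo ≠ [] ∧ pre = [owner, repo] ∧ cur = [])) →
    pvFin (pvAltScan s owner repo st) = pvOut (pre ++ pvSegAcc s cur) := by
  induction s with
  | nil =>
    intro owner repo st pre cur h
    rcases h with ⟨h0, ho, hr, hp, hcur⟩ | ⟨h0, ho, hr, hp, hcur⟩ | ⟨h0, ho, hr, hp, hcur⟩ |
      ⟨h0, ho, hr, hp, hcur⟩ | ⟨h0, ho, hr, hp, hcur⟩ <;> subst h0 <;> subst hp <;> subst hcur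
    · subst ho; subst hr
      simp [pvAltScan, pvFin, pvSegAcc, pvOut_nil]
    · subst hr
      simp [pvAltScan, pvFin, pvSegAcc, ho, pvOut_one]
    · subst hr
      simp [pvAltScan, pvFin, pvSegAcc, pvOut_one]
    · simp [pvAltScan, pvFin, pvSegAcc, hr, pvOut_two]
    · simp [pvAltScan, pvFin, pvSegAcc, hr, pvOut_two]
  | cons c rest ih =>
    intro owner repo st pre cur h
    by_cases hc : c = '/'
    · subst hc
      rcases h with ⟨h0, ho, hr, hp, hcur⟩ | ⟨h0, ho, hr, hp, hcur⟩ | ⟨h0, ho, hr, hp, hcur⟩ |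
        ⟨h0, ho, hr, hp, hcur⟩ | ⟨h0, ho, hr, hp, hcur⟩ <;> subst h0 <;> subst hp <;> subst hcur
      · -- state 0 stays 0
        subst ho; subst hr
        have h1 : pvAltScan ('/' :: rest) [] [] 0 = pvAltScan rest [] [] 0 := by
          simp [pvAltScan]
        have h2 : pvSegAcc ('/' :: rest) ([] : List Char) = pvSegAcc rest [] := by
          simp [pvSegAcc]
        rw [h1, h2, ih [] [] 0 [] [] (Or.inl ⟨rfl, rfl, rfl, rfl, rfl⟩)]
      · -- state 1 → 2
        subst hr
        have h1 : pvAltScan ('/' :: rest) owner [] 1 = pvAltScan rest owner [] 2 := by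
          simp [pvAltScan]
        have h2 : pvSegAcc ('/' :: rest) owner.reverse = owner :: pvSegAcc rest [] := by
          simp [pvSegAcc, ho]
        rw [h1, h2, ih owner [] 2 [owner] [] (Or.inr (Or.inr (Or.inl ⟨rfl, ho, rfl, rfl, rfl⟩)))]
        rfl
      · -- state 2 stays 2
        subst hr
        have h1 : pvAltScan ('/' :: rest) owner [] 2 = pvAltScan rest owner [] 2 := by
          simp [pvAltScan]
        have h2 : pvSegAcc ('/' :: rest) ([] : List Char) = pvSegAcc rest [] := by
          simp [pvSegAcc]
        rw [h1, h2, ih owner [] 2 [owner] [] (Or.inr (Or.inr (Or.inl ⟨rfl, ho, rfl, rfl, rfl⟩)))]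
      · -- state 3 → 4
        have h1 : pvAltScan ('/' :: rest) owner repo 3 = pvAltScan rest owner repo 4 := by
          simp [pvAltScan]
        have h2 : pvSegAcc ('/' :: rest) repo.reverse = repo :: pvSegAcc rest [] := by
          simp [pvSegAcc, hr]
        rw [h1, h2, ih owner repo 4 [owner, repo] []
          (Or.inr (Or.inr (Or.inr (Or.inr ⟨rfl, ho, hr, rfl, rfl⟩))))]
        rfl
      · -- state 4 stays 4
        have h1 : pvAltScan ('/' :: rest) owner repo 4 = pvAltScan rest owner repo 4 := by
          simp [pvAltScan]
        have h2 : pvSegAcc ('/' :: rest) ([] : List Char) = pvSegAcc rest [] := by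
          simp [pvSegAcc]
        rw [h1, h2, ih owner repo 4 [owner, repo] []
          (Or.inr (Or.inr (Or.inr (Or.inr ⟨rfl, ho, hr, rfl, rfl⟩))))]
    · rcases h with ⟨h0, ho, hr, hp, hcur⟩ | ⟨h0, ho, hr, hp, hcur⟩ | ⟨h0, ho, hr, hp, hcur⟩ |
        ⟨h0, ho, hr, hp, hcur⟩ | ⟨h0, ho, hr, hp, hcur⟩ <;> subst h0 <;> subst hp <;> subst hcur
      · -- state 0 → 1, owner starts as [c]
        subst ho; subst hr
        have h1 : pvAltScan (c :: rest) [] [] 0 = pvAltScan rest [c] [] 1 := by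
          simp [pvAltScan, hc]
        have h2 : pvSegAcc (c :: rest) ([] : List Char) = pvSegAcc rest [c] := by
          simp [pvSegAcc, hc]
        rw [h1, h2, ih [c] [] 1 [] [c] (Or.inr (Or.inl ⟨rfl, by simp, rfl, rfl, by simp⟩))]
      · -- state 1 stays 1, owner grows
        subst hr
        have h1 : pvAltScan (c :: rest) owner [] 1 = pvAltScan rest (owner ++ [c]) [] 1 := by
          simp [pvAltScan, hc]
        have h2 : pvSegAcc (c :: rest) owner.reverse = pvSegAcc rest (c :: owner.reverse) := by
          simp [pvSegAcc, hc]
        rw [h1, h2, ih (owner ++ [c]) [] 1 [] (owner ++ [c]).reverse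
          (Or.inr (Or.inl ⟨rfl, by simp, rfl, rfl, rfl⟩))]
        simp
      · -- state 2 → 3, repo starts as [c]
        subst hr
        have h1 : pvAltScan (c :: rest) owner [] 2 = pvAltScan rest owner [c] 3 := by
          simp [pvAltScan, hc]
        have h2 : pvSegAcc (c :: rest) ([] : List Char) = pvSegAcc rest [c] := by
          simp [pvSegAcc, hc]
        rw [h1, h2, ih owner [c] 3 [owner] [c]
          (Or.inr (Or.inr (Or.inr (Or.inl ⟨rfl, ho, by simp, rfl, by simp⟩))))]
      · -- state 3 stays 3, repo grows
        have h1 : pvAltScan (c :: rest) owner repo 3 = pvAltScan rest owner (repo ++ [c]) 3 := by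
          simp [pvAltScan, hc]
        have h2 : pvSegAcc (c :: rest) repo.reverse = pvSegAcc rest (c :: repo.reverse) := by
          simp [pvSegAcc, hc]
        rw [h1, h2, ih owner (repo ++ [c]) 3 [owner] (repo ++ [c]).reverse
          (Or.inr (Or.inr (Or.inr (Or.inl ⟨rfl, ho, by simp, rfl, rfl⟩))))]
        simp
      · -- state 4: a third segment starts, B bails out; A has ≥ 3 parts
        have h1 : pvAltScan (c :: rest) owner repo 4 = none := by
          simp [pvAltScan, hc]
        have h3 : pvSegAcc (c :: rest) ([] : List Char) ≠ [] := by
          have he : pvSegAcc (c :: rest) ([] : List Char) = pvSegAcc rest [c] := by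
            simp [pvSegAcc, hc]
          rw [he]
          exact pvSegAcc_ne_nil rest [c] (by simp)
        obtain ⟨x, l, hx⟩ := List.exists_cons_of_ne_nil h3
        rw [h1, hx]
        simp [pvFin, pvOut_long]

lemma pvIf_out (l : List (List Char)) :
    (if l.length = 2 then String.ofList (l[0]! ++ '/' :: l[1]!) else "") = String.ofList (pvOut l) := by
  match l with
  | [] => rfl
  | [a] => rfl
  | [a, b] => simp [pvOut_two]
  | a :: b :: c :: t => simp only [pvOut_long]; rfl

lemma pvCore_eq (s : List Char) :
    (let parts := (PySem.Chars.splitOn s ['/']).filter (fun p => !p.isEmpty)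
     if parts.length = 2 then String.ofList (parts[0]! ++ '/' :: parts[1]!) else "")
    = (match pvAltScan s [] [] 0 with
       | some (owner, repo) => if repo.isEmpty then "" else String.ofList (owner ++ '/' :: repo)
       | none => "") := by
  have hk := pvKey s [] [] 0 [] [] (Or.inl ⟨rfl, rfl, rfl, rfl, rfl⟩)
  simp only [pvSplitOn_eq, pvFilter_split, pvIf_out]
  simp only [List.nil_append] at hk
  rw [← hk]
  cases h : pvAltScan s [] [] 0 with
  | none => simp [pvFin]
  | some p =>
    obtain ⟨o, r⟩ := p
    by_cases hr : r.isEmpty <;> simp [pvFin, hr]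

lemma pvHead_eq (s1 : List Char) :
    (if PySem.Chars.endswith s1 ".git".toList then PySem.Chars.slice s1 none (some (-4)) else s1)
    = pvRemoveSuffixGit s1 := by
  unfold pvRemoveSuffixGit
  by_cases h : PySem.Chars.endswith s1 ".git".toList = true
  · rw [if_pos h, if_pos h]
    rw [PySem.Chars.slice_eq_listSlice, PySem.List.slice_to_neg_ofNat s1 4 (by omega)]
  · rw [if_neg h, if_neg h]

lemma pvPref_eq (s : List Char) :
    (if PySem.Chars.startswith s "https://github.com/".toList then s.drop "https://github.com/".length
     else if PySem.Chars.startswith s "http://github.com/".toList then s.drop "http://github.com/".length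
     else if PySem.Chars.startswith s "github.com/".toList then s.drop "github.com/".length
     else s) = pvStripPrefLoop pvPrefixes s := by
  simp only [pvPrefixes, pvStripPrefLoop]
  rfl

-- ===== VERDICT (by name: the statement is the Claim_ definition above) =====
theorem normalize_repo_py_spec : Claim_equal_normalize_repo_py := by
  intro raw _
  unfold Spec_normalize_repo_py normalize_repo_py normalize_repo_py_alt
  dsimp only
  rw [pvHead_eq, pvPref_eq]
  exact pvCore_eq _
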